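-- pv_equiv track=rewrite | github.com/project-numina/kimina-lean-server | utils/proof_utils.py | get_messages_for_lines
-- ===== SOURCE A (Python) =====
-- def get_messages_for_lines(messages, start_line, end_line):
--     selected_messages = []
--     has_error = False
--     is_unsolved_goals = False
--     for idx in range(start_line, end_line + 1):
--         if idx in messages:
--             selected_messages.append(messages[idx])
--             if messages[idx]["severity"] == "error":
--                 has_error = True
--             if "unsolved goals" in messages[idx]["message"]:
--                 is_unsolved_goals = True
--     return selected_messages, has_error, is_unsolved_goals
-- ===== SOURCE B (Python) =====
-- def get_messages_for_lines(messages, start_line, end_line):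
--     keys = sorted(k for k in messages if start_line <= k <= end_line)
--     selected = [messages[k] for k in keys]
--     has_error = any(m["severity"] == "error" for m in selected)
--     is_unsolved_goals = any("unsolved goals" in m["message"] for m in selected)
--     return selected, has_error, is_unsolved_goals
-- ===== Notes on version B (the rewrite author's own statement) =====
-- stated objective: alternative
-- what changed: B iterates the dict's own keys, filters them to [start_line, end_line] and sorts them ascending (O(m log m) in the number of entries), instead of scanning every integer in the range and probing the dict at each (O(end-start)); the two flags become any() over the selected messages instead of accumulator booleans inside the scan loop.
import Mathlib
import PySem

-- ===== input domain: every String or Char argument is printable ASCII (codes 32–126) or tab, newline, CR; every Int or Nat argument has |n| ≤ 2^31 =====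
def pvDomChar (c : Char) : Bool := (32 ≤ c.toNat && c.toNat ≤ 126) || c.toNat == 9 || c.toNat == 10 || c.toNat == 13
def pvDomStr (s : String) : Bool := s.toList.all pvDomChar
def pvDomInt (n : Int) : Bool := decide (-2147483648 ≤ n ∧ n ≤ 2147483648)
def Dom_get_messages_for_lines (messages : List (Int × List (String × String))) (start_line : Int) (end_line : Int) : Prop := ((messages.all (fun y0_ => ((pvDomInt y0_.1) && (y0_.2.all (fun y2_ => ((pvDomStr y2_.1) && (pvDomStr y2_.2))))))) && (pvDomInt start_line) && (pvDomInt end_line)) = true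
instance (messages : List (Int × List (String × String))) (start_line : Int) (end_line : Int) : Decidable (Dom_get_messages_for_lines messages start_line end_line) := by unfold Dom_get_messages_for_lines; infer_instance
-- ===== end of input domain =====

-- B collects, range-filters and sorts the dict's own keys instead of scanning every integer in
-- [start_line, end_line]; same result, a different traversal (not measured faster).


-- ===== PORT A =====
def get_messages_for_lines (messages : List (Int × List (String × String))) (start_line : Int) (end_line : Int) : (List (List (String × String))) × Bool × Bool :=
  (PySem.List.pyRange start_line (end_line + 1) 1).foldl
    (fun (st : List (List (String × String)) × Bool × Bool) idx =>
      match (PySem.Dict.mk messages).get? idx with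
      | none => st
      | some m =>
          (st.1 ++ [m],
           st.2.1 || ((PySem.Dict.mk m).getD "severity" "" == "error"),
           st.2.2 || PySem.Str.isIn "unsolved goals" ((PySem.Dict.mk m).getD "message" "")))
    ([], false, false)

-- ===== PORT B =====
def get_messages_for_lines_alt (messages : List (Int × List (String × String))) (start_line : Int) (end_line : Int) : (List (List (String × String))) × Bool × Bool :=
  -- 'for k in messages' iterates the dict's (unique) keys: dedup of the assoc list's keys
  let keys := PySem.List.sorted
      ((PySem.List.dedup (messages.map Prod.fst)).filter
        (fun k => decide (start_line ≤ k) && decide (k ≤ end_line)))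
      (fun k => k) false
  let selected := keys.map (fun k => (PySem.Dict.mk messages).getD k [])
  (selected,
   selected.any (fun m => (PySem.Dict.mk m).getD "severity" "" == "error"),
   selected.any (fun m => PySem.Str.isIn "unsolved goals" ((PySem.Dict.mk m).getD "message" "")))

-- ===== PRECONDITION & SPEC =====
-- Pre_ excludes exactly the inputs on which Python A raises KeyError: a message whose line is in
-- [start_line, end_line] but which lacks a "severity" or "message" key.
def Pre_get_messages_for_lines (messages : List (Int × List (String × String))) (start_line : Int) (end_line : Int) : Prop :=
  ∀ p ∈ messages, start_line ≤ p.1 ∧ p.1 ≤ end_line →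
    (PySem.Dict.mk ((PySem.Dict.mk messages).getD p.1 [])).contains "severity" = true ∧
    (PySem.Dict.mk ((PySem.Dict.mk messages).getD p.1 [])).contains "message" = true
instance (messages : List (Int × List (String × String))) (start_line : Int) (end_line : Int) : Decidable (Pre_get_messages_for_lines messages start_line end_line) := by unfold Pre_get_messages_for_lines; infer_instance

def pvWitness_get_messages_for_lines : (List (Int × List (String × String))) × Int × Int :=
  ([(1, [("severity", "error"), ("message", "unsolved goals remain")]),
    (3, [("severity", "warning"), ("message", "ok")])], 0, 2)

def Spec_get_messages_for_lines (messages : List (Int × List (String × String))) (start_line : Int) (end_line : Int) (out : (List (List (String × String))) × Bool × Bool) : Prop := out = get_messages_for_lines_alt messages start_line end_line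
instance (messages : List (Int × List (String × String))) (start_line : Int) (end_line : Int) (out : (List (List (String × String))) × Bool × Bool) : Decidable (Spec_get_messages_for_lines messages start_line end_line out) := by unfold Spec_get_messages_for_lines; infer_instance

-- ===== CLAIM (what is proved, stated in full; the proofs are below) =====
def Claim_equal_get_messages_for_lines : Prop := ∀ (messages : List (Int × List (String × String))) (start_line : Int) (end_line : Int), Dom_get_messages_for_lines messages start_line end_line → Pre_get_messages_for_lines messages start_line end_line → Spec_get_messages_for_lines messages start_line end_line (get_messages_for_lines messages start_line end_line)

-- ===== LEMMAS AND PROOFS =====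

-- A's loop, characterised: selected = filterMap of the lookup over the range, flags = any over it
theorem pvFoldA (messages : List (Int × List (String × String))) (R : List Int)
    (st : List (List (String × String)) × Bool × Bool) :
    R.foldl
      (fun (st : List (List (String × String)) × Bool × Bool) idx =>
        match (PySem.Dict.mk messages).get? idx with
        | none => st
        | some m =>
            (st.1 ++ [m],
             st.2.1 || ((PySem.Dict.mk m).getD "severity" "" == "error"),
             st.2.2 || PySem.Str.isIn "unsolved goals" ((PySem.Dict.mk m).getD "message" "")))
      st
    = (st.1 ++ R.filterMap (fun idx => (PySem.Dict.mk messages).get? idx),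
       st.2.1 || (R.filterMap (fun idx => (PySem.Dict.mk messages).get? idx)).any
         (fun m => (PySem.Dict.mk m).getD "severity" "" == "error"),
       st.2.2 || (R.filterMap (fun idx => (PySem.Dict.mk messages).get? idx)).any
         (fun m => PySem.Str.isIn "unsolved goals" ((PySem.Dict.mk m).getD "message" ""))) := by
  induction R generalizing st with
  | nil => simp
  | cons r t ih =>
    simp only [List.foldl_cons, List.filterMap_cons]
    cases h : (PySem.Dict.mk messages).get? r with
    | none => rw [ih]
    | some m => rw [ih]; simp [Bool.or_assoc]

-- filterMap of a lookup = filter by presence, then map the (total) defaulted lookup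
theorem pvFilterMap_eq_filter_map {α : Type} (g : Int → Option α) (d : α) (l : List Int) :
    l.filterMap g = (l.filter (fun x => (g x).isSome)).map (fun x => (g x).getD d) := by
  induction l with
  | nil => simp
  | cons x t ih => cases h : g x <;> simp [h, ih]

-- the sorted filtered key list of B is exactly the presence-filtered range of A
theorem pvKeys_eq (messages : List (Int × List (String × String))) (a e : Int) :
    PySem.List.sorted
      ((PySem.List.dedup (messages.map Prod.fst)).filter
        (fun k => decide (a ≤ k) && decide (k ≤ e)))
      (fun k => k) false
    = (PySem.List.pyRange a (e + 1) 1).filter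
        (fun k => ((PySem.Dict.mk messages).get? k).isSome) := by
  apply PySem.List.sorted_eq_of_perm_of_pairwise_lt
  · apply (List.perm_ext_iff_of_nodup ?_ ?_).mpr
    · intro k
      simp only [List.mem_filter, PySem.List.mem_pyRange_one, PySem.List.mem_dedup,
        Option.isSome_iff_ne_none, Ne, PySem.Dict.get?_eq_none_iff_not_mem_keys,
        PySem.Dict.keys_mk, not_not, decide_eq_true_eq, Bool.and_eq_true]
      constructor
      · rintro ⟨⟨h1, h2⟩, h3⟩; exact ⟨h3, by omega⟩
      · rintro ⟨h3, h1, h2⟩; exact ⟨⟨h1, by omega⟩, h3⟩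
    · exact ((PySem.List.pairwise_lt_pyRange_one a (e+1)).nodup).filter _
    · exact (PySem.List.nodup_dedup _).filter _
  · exact ((PySem.List.pairwise_lt_pyRange_one a (e+1)).filter _)

-- ===== VERDICT (by name: the statement is the Claim_ definition above) =====
theorem get_messages_for_lines_spec : Claim_equal_get_messages_for_lines := by
  intro messages start_line end_line _ _
  unfold Spec_get_messages_for_lines get_messages_for_lines get_messages_for_lines_alt
  rw [pvFoldA, pvFilterMap_eq_filter_map (fun idx => (PySem.Dict.mk messages).get? idx) [], pvKeys_eq]
  simp [PySem.Dict.getD_eq_get?_getD]
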